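-- pv_equiv track=rewrite | github.com/carrdelling/AdventOfCode2021 | day17/gold.py | times_in_window
-- ===== SOURCE A (Python) =====
-- MAX_STEPS = 1000  # cause 100 is not enough!
--
-- def times_in_window(x_speed, xmin, xmax):
--
--     steps = 0
--     current = 0
--
--     while current <= xmax and steps <= MAX_STEPS:
--         current += x_speed
--         x_speed += 1 if x_speed < 0 else (-1 if x_speed > 0 else 0)
--         steps += 1
--
--         if xmax >= current >= xmin:
--             yield steps
-- ===== SOURCE B (Python) =====
-- MAX_STEPS = 1000  # same inclusive step bound as the original
--
-- def times_in_window(x_speed, xmin, xmax):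
--     # Transient phase: simulate only while the probe is still moving.
--     steps = 0
--     current = 0
--     while x_speed != 0 and current <= xmax and steps <= MAX_STEPS:
--         current += x_speed
--         x_speed += 1 if x_speed < 0 else -1
--         steps += 1
--         if xmin <= current <= xmax:
--             yield steps
--     # Settled phase: position is fixed; emit the remaining step indices in closed form.
--     if x_speed == 0 and steps <= MAX_STEPS and xmin <= current <= xmax:
--         yield from range(steps + 1, MAX_STEPS + 2)
-- ===== Notes on version B (the rewrite author's own statement) =====
-- stated objective: faster
-- what changed: B simulates only the transient phase while x_speed != 0 and, once the probe settles inside the window, emits the remaining step indices as a closed-form range instead of simulating up to MAX_STEPS.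
import Mathlib
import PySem

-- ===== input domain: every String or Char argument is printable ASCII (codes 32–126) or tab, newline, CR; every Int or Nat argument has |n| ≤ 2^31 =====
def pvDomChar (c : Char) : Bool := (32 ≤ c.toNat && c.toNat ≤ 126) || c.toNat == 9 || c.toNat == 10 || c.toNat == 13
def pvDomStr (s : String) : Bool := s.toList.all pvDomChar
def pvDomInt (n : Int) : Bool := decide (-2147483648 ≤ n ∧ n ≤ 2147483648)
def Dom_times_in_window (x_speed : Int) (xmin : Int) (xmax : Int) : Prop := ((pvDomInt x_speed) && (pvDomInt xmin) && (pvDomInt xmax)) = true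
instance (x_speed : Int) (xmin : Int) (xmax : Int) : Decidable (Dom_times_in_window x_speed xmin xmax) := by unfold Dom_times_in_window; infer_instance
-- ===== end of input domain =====

-- B replaces A's step-by-step simulation of the settled (x_speed = 0) phase by a closed-form range; A = B everywhere.

-- ===== PORT A =====
-- the while loop of A, state (x_speed, current, steps); yields collected into the returned list
def timesAuxA (x_speed current steps xmin xmax : Int) : List Int :=
  if _h : current ≤ xmax ∧ steps ≤ 1000 then
    let current' := current + x_speed
    let x_speed' := x_speed + (if x_speed < 0 then 1 else if x_speed > 0 then -1 else 0)
    let steps' := steps + 1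
    (if xmax ≥ current' ∧ current' ≥ xmin then [steps'] else []) ++
      timesAuxA x_speed' current' steps' xmin xmax
  else []
termination_by (1001 - steps).toNat
decreasing_by omega

def times_in_window (x_speed : Int) (xmin : Int) (xmax : Int) : List Int :=
  timesAuxA x_speed 0 0 xmin xmax

-- ===== PORT B =====
-- transient while loop of B: yields so far, plus the final (x_speed, current, steps) state
def transientB (x_speed current steps xmin xmax : Int) : List Int × Int × Int × Int :=
  if _h : x_speed ≠ 0 ∧ current ≤ xmax ∧ steps ≤ 1000 then
    let current' := current + x_speed
    let x_speed' := x_speed + (if x_speed < 0 then 1 else -1)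
    let steps' := steps + 1
    let r := transientB x_speed' current' steps' xmin xmax
    ((if xmin ≤ current' ∧ current' ≤ xmax then [steps'] else []) ++ r.1, r.2)
  else ([], (x_speed, current, steps))
termination_by (1001 - steps).toNat
decreasing_by omega

def times_in_window_alt (x_speed : Int) (xmin : Int) (xmax : Int) : List Int :=
  let r := transientB x_speed 0 0 xmin xmax
  let xs := r.2.1
  let cur := r.2.2.1
  let steps := r.2.2.2
  r.1 ++ (if xs = 0 ∧ steps ≤ 1000 ∧ xmin ≤ cur ∧ cur ≤ xmax
          then PySem.List.pyRange (steps + 1) 1002 1 else [])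

-- ===== PRECONDITION & SPEC =====
def Spec_times_in_window (x_speed : Int) (xmin : Int) (xmax : Int) (out : List Int) : Prop := out = times_in_window_alt x_speed xmin xmax
instance (x_speed : Int) (xmin : Int) (xmax : Int) (out : List Int) : Decidable (Spec_times_in_window x_speed xmin xmax out) := by unfold Spec_times_in_window; infer_instance

-- ===== CLAIM (what is proved, stated in full; the proofs are below) =====
def Claim_equal_times_in_window : Prop := ∀ (x_speed : Int) (xmin : Int) (xmax : Int), Dom_times_in_window x_speed xmin xmax → Spec_times_in_window x_speed xmin xmax (times_in_window x_speed xmin xmax)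

-- ===== LEMMAS AND PROOFS =====

-- the settled-phase tail B appends after the transient loop
def settledTail (xmin xmax x_speed current steps : Int) : List Int :=
  if x_speed = 0 ∧ steps ≤ 1000 ∧ xmin ≤ current ∧ current ≤ xmax
  then PySem.List.pyRange (steps + 1) 1002 1 else []

-- A's loop with x_speed = 0 is exactly the closed-form range
theorem timesAuxA_settled (xmin xmax : Int) : ∀ (n : ℕ) (current steps : Int),
    (1001 - steps).toNat = n →
    timesAuxA 0 current steps xmin xmax = settledTail xmin xmax 0 current steps := by
  intro n
  induction n with
  | zero =>
    intro c s hs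
    rw [timesAuxA.eq_def]
    rw [dif_neg (by omega : ¬ (c ≤ xmax ∧ s ≤ 1000))]
    unfold settledTail
    rw [if_neg (by omega : ¬ ((0:Int) = 0 ∧ s ≤ 1000 ∧ xmin ≤ c ∧ c ≤ xmax))]
  | succ n ih =>
    intro c s hs
    have hsle : s ≤ 1000 := by omega
    rw [timesAuxA.eq_def]
    simp only [add_zero, show ((0:Int) + if (0:Int) < 0 then (1:Int) else if (0:Int) > 0 then -1 else 0) = 0 by norm_num]
    by_cases hc : c ≤ xmax
    · rw [dif_pos ⟨hc, hsle⟩, ih c (s + 1) (by omega)]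
      unfold settledTail
      by_cases hw : xmin ≤ c
      · rw [if_pos (⟨hc, hw⟩ : xmax ≥ c ∧ c ≥ xmin),
            if_pos (⟨rfl, hsle, hw, hc⟩ : (0:Int) = 0 ∧ s ≤ 1000 ∧ xmin ≤ c ∧ c ≤ xmax)]
        by_cases hs1 : s + 1 ≤ 1000
        · rw [if_pos (⟨rfl, hs1, hw, hc⟩ : (0:Int) = 0 ∧ s + 1 ≤ 1000 ∧ xmin ≤ c ∧ c ≤ xmax)]
          conv_rhs => rw [PySem.List.pyRange_one_cons (show s + 1 < 1002 by omega)]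
          simp
        · rw [if_neg (by tauto : ¬ ((0:Int) = 0 ∧ s + 1 ≤ 1000 ∧ xmin ≤ c ∧ c ≤ xmax))]
          have hse : s = 1000 := by omega
          subst hse
          rw [PySem.List.pyRange_one_cons (by norm_num)]
          norm_num [PySem.List.pyRange]
      · rw [if_neg (by omega : ¬ (xmax ≥ c ∧ c ≥ xmin)),
            if_neg (by tauto : ¬ ((0:Int) = 0 ∧ s + 1 ≤ 1000 ∧ xmin ≤ c ∧ c ≤ xmax)),
            if_neg (by tauto : ¬ ((0:Int) = 0 ∧ s ≤ 1000 ∧ xmin ≤ c ∧ c ≤ xmax))]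
        simp
    · rw [dif_neg (by tauto : ¬ (c ≤ xmax ∧ s ≤ 1000))]
      unfold settledTail
      rw [if_neg (by tauto : ¬ ((0:Int) = 0 ∧ s ≤ 1000 ∧ xmin ≤ c ∧ c ≤ xmax))]

-- main loop correspondence: A's loop = B's transient yields ++ settled tail at the exit state
theorem main_loop (xmin xmax : Int) : ∀ (n : ℕ) (x c s : Int),
    (1001 - s).toNat = n →
    timesAuxA x c s xmin xmax =
      (transientB x c s xmin xmax).1 ++
        settledTail xmin xmax (transientB x c s xmin xmax).2.1
          (transientB x c s xmin xmax).2.2.1 (transientB x c s xmin xmax).2.2.2 := by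
  intro n
  induction n with
  | zero =>
    intro x c s hs
    rw [timesAuxA.eq_def, transientB.eq_def]
    rw [dif_neg (by omega : ¬ (x ≠ 0 ∧ c ≤ xmax ∧ s ≤ 1000)),
        dif_neg (by omega : ¬ (c ≤ xmax ∧ s ≤ 1000))]
    unfold settledTail
    rw [if_neg (by omega : ¬ (x = 0 ∧ s ≤ 1000 ∧ xmin ≤ c ∧ c ≤ xmax))]
    simp
  | succ n ih =>
    intro x c s hs
    by_cases hx : x = 0
    · subst hx
      rw [timesAuxA_settled xmin xmax _ c s hs, transientB.eq_def]
      
      rw [dif_neg (by tauto : ¬ ((0:Int) ≠ 0 ∧ c ≤ xmax ∧ s ≤ 1000))]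
      simp
    · rw [timesAuxA.eq_def, transientB.eq_def]
      by_cases hcs : c ≤ xmax ∧ s ≤ 1000
      · rw [dif_pos hcs, dif_pos ⟨hx, hcs⟩]
        have hspd : (x + if x < 0 then 1 else if x > 0 then -1 else 0)
                  = x + if x < 0 then 1 else -1 := by
          by_cases h : x < 0
          · simp [h]
          · have h2 : x > 0 := by omega
            simp [h, h2]
        simp only [hspd]
        rw [ih (x + (if x < 0 then 1 else -1)) (c + x) (s + 1) (by omega)]
        by_cases hw : xmin ≤ c + x ∧ c + x ≤ xmax
        · rw [if_pos (⟨hw.2, hw.1⟩ : xmax ≥ c + x ∧ c + x ≥ xmin), if_pos hw]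
          simp
        · rw [if_neg (by tauto : ¬ (xmax ≥ c + x ∧ c + x ≥ xmin)), if_neg hw]
          simp
      · rw [dif_neg hcs, dif_neg (by tauto : ¬ (x ≠ 0 ∧ c ≤ xmax ∧ s ≤ 1000))]
        unfold settledTail
        rw [if_neg (by tauto : ¬ (x = 0 ∧ s ≤ 1000 ∧ xmin ≤ c ∧ c ≤ xmax))]
        simp

-- ===== VERDICT (by name: the statement is the Claim_ definition above) =====
theorem times_in_window_spec : Claim_equal_times_in_window := by
  intro x xmin xmax _
  unfold Spec_times_in_window times_in_window times_in_window_alt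
  rw [main_loop xmin xmax ((1001:Int) - 0).toNat x 0 0 rfl]
  rfl
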